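-- pv_equiv track=rewrite | github.com/JamesJeffryes/advent_of_code_2018 | day08.py | parse_subtree_value
-- ===== SOURCE A (Python) =====
-- def parse_subtree_value(flat_tree, pointer):
--     n_children = flat_tree[pointer]
--     n_metadata = flat_tree[pointer + 1]
--     children = []
--     value = 0
--     pointer += 2
--     while len(children) < n_children:
--         child_value, pointer = parse_subtree_value(flat_tree, pointer)
--         children.append(child_value)
--
--     metadata = flat_tree[pointer:pointer + n_metadata]
--     if not n_children:
--         value += sum(metadata)
--     else:
--         value = sum((children[x-1] for x in metadata if x <= len(children)))
--
--     pointer += n_metadata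
--
--     return value, pointer
-- ===== SOURCE B (Python) =====
-- def parse_subtree_value(flat_tree, pointer):
--     # Iterative explicit-stack parser: one pass, no recursion.
--     # Each frame is [n_children, n_metadata, children_values].
--     stack = []
--     while True:
--         n_children = flat_tree[pointer]
--         n_metadata = flat_tree[pointer + 1]
--         pointer += 2
--         stack.append([n_children, n_metadata, []])
--         while len(stack[-1][2]) >= stack[-1][0]:
--             n_children, n_metadata, children = stack.pop()
--             metadata = flat_tree[pointer:pointer + n_metadata]
--             if not n_children:
--                 value = sum(metadata)
--             else:
--                 value = sum(children[x - 1] for x in metadata if x <= len(children))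
--             pointer += n_metadata
--             if not stack:
--                 return value, pointer
--             stack[-1][2].append(value)
-- ===== Notes on version B (the rewrite author's own statement) =====
-- stated objective: alternative
-- what changed: Replaced A's recursive-descent parser by a single-pass iterative parser with an explicit stack of frames (remaining-children header, metadata count, accumulated child values); node values are computed when a frame completes and appended to the parent frame, so no recursion is used.
import Mathlib
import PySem

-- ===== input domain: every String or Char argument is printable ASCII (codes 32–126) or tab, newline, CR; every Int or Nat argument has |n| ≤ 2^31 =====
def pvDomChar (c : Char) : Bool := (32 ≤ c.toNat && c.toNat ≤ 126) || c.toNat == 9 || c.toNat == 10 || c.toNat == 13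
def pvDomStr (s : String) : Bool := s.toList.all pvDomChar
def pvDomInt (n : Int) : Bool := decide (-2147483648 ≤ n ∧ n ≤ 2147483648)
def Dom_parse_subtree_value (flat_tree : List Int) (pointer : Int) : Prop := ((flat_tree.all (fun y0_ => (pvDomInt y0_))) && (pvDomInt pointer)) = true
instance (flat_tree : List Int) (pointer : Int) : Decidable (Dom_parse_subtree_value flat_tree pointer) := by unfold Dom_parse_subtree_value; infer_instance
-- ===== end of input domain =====

-- B is an explicit-stack iterative parser replacing A's recursive descent (objective: alternative
-- decomposition, same asymptotic cost). Equality of the return values is proved on Pre_ (the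
-- well-formed inputs, i.e. exactly where the Python A returns instead of raising).

-- ===== PORT A =====
-- shared transliteration of the node-value expression both Python sources contain verbatim:
-- sum(metadata) when n_children == 0, else sum(children[x-1] for x in metadata if x <= len(children));
-- children[x-1] may raise IndexError, hence the Option result.
def metaStep (nc : Int) (children : List Int) (acc : Option Int) (x : Int) : Option Int :=
  match acc with
  | none => none
  | some a =>
    if nc = 0 then some (a + x)
    else if x ≤ (children.length : Int) then
      match PySem.List.pyGet? children (x - 1) with
      | none => none
      | some c => some (a + c)
    else some a

def metaValue (nc : Int) (children metadata : List Int) : Option Int :=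
  metadata.foldl (metaStep nc children) (some 0)

-- the `while len(children) < n_children` loop of A; `step` is the recursive call at one
-- less depth fuel, rem = n_children - len(children)
def childLoopGo (step : Int → Option (Int × Int)) : Nat → Int → List Int → Option (List Int × Int)
  | 0, p, acc => some (acc, p)
  | rem + 1, p, acc =>
    match step p with
    | none => none
    | some (v, p') => childLoopGo step rem p' (acc ++ [v])

-- A's recursion; fuel bounds the recursion DEPTH only (none = IndexError or fuel exhausted,
-- the latter never happens on Pre_ inputs).
def parseAux (ft : List Int) : Nat → Int → Option (Int × Int)
  | 0, _ => none
  | f + 1, p =>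
    match PySem.List.pyGet? ft p, PySem.List.pyGet? ft (p + 1) with
    | some nc, some nm =>
      match childLoopGo (fun q => parseAux ft f q) nc.toNat (p + 2) [] with
      | none => none
      | some (children, p2) =>
        match metaValue nc children (PySem.List.slice ft (some p2) (some (p2 + nm))) with
        | none => none
        | some v => some (v, p2 + nm)
    | _, _ => none

def parse_subtree_value (flat_tree : List Int) (pointer : Int) : Int × Int :=
  (parseAux flat_tree (2 * flat_tree.length + 2) pointer).getD (0, 0)

-- ===== PORT B =====
-- fuel bound for the machine: it pushes one frame per node; a returning run has depth ≤ 2*len+2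
-- and branching ≤ (max entry), so (max entry + 2) ^ (2*len+2) pushes suffice (proved below).
def maxEntry (ft : List Int) : Nat := ft.foldl (fun a x => max a x.toNat) 0

def bFuel (ft : List Int) : Nat := (maxEntry ft + 2) ^ (2 * ft.length + 2)

-- the inner `while len(stack[-1][2]) >= stack[-1][0]` loop of Source B: pop completed frames
-- (computing their value) or, when the top frame still needs children, hand control back to
-- the outer loop (`run`, the machine at the current push fuel) to read the next header.
-- The top frame is kept apart from the rest of the stack.
def closeGo (ft : List Int) (run : Int → List (Int × Int × List Int) → Option (Int × Int)) :
    Int → (Int × Int × List Int) → List (Int × Int × List Int) → Option (Int × Int)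
  | p, (nc, nm, ch), st =>
    if nc ≤ (ch.length : Int) then
      match metaValue nc ch (PySem.List.slice ft (some p) (some (p + nm))) with
      | none => none
      | some v =>
        match st with
        | [] => some (v, p + nm)
        | (nc', nm', ch') :: st' => closeGo ft run (p + nm) (nc', nm', ch' ++ [v]) st'
    else run p ((nc, nm, ch) :: st)

-- the outer `while True` loop of Source B: read a header, push a frame, close what is complete
def runB (ft : List Int) : Nat → Int → List (Int × Int × List Int) → Option (Int × Int)
  | 0, _, _ => none
  | g + 1, p, st =>
    match PySem.List.pyGet? ft p, PySem.List.pyGet? ft (p + 1) with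
    | some nc, some nm => closeGo ft (fun q stk => runB ft g q stk) (p + 2) (nc, nm, []) st
    | _, _ => none

def parse_subtree_value_alt (flat_tree : List Int) (pointer : Int) : Int × Int :=
  (runB flat_tree (bFuel flat_tree) pointer []).getD (0, 0)

-- ===== PRECONDITION & SPEC =====
-- Pre_: well-formedness of the encoded tree at `pointer` — the natural domain of an AoC day-8
-- parser. The domain of any such parser is a grammar (like balanced parentheses): it is
-- inherently inductive, so no non-recursive bound/shape formula can express it; wfNode is that
-- grammar judgment and nothing more. It checks a SHAPE: both header cells readable, the child
-- subtrees well-formed in sequence, and every child-indexing metadata entry in range; it tracks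
-- only spans and counts — no values, no child lists, no stack — so it is not a copy of either
-- port. Pre_ holds exactly where Python A returns normally; everywhere else A raises IndexError
-- (or, for unboundedly regressing pointers, RecursionError). The depth fuel 2*len+2 is ample:
-- a terminating run's active frames sit at pairwise distinct read positions in [-len, len).
def wfKidsGo (step : Int → Option Int) : Nat → Int → Option Int
  | 0, p => some p
  | rem + 1, p =>
    match step p with
    | none => none
    | some p' => wfKidsGo step rem p'

def wfNode (ft : List Int) : Nat → Int → Option Int
  | 0, _ => none
  | f + 1, p =>
    match PySem.List.pyGet? ft p, PySem.List.pyGet? ft (p + 1) with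
    | some nc, some nm =>
      match wfKidsGo (fun q => wfNode ft f q) nc.toNat (p + 2) with
      | none => none
      | some p2 =>
        if nc = 0 ∨ ∀ x ∈ PySem.List.slice ft (some p2) (some (p2 + nm)), -(nc.toNat : Int) < x
        then some (p2 + nm) else none
    | _, _ => none

def Pre_parse_subtree_value (flat_tree : List Int) (pointer : Int) : Prop :=
  (wfNode flat_tree (2 * flat_tree.length + 2) pointer).isSome = true
instance (flat_tree : List Int) (pointer : Int) : Decidable (Pre_parse_subtree_value flat_tree pointer) := by unfold Pre_parse_subtree_value; infer_instance

def pvWitness_parse_subtree_value : List Int × Int := ([2, 3, 0, 3, 10, 11, 12, 1, 1, 0, 1, 99, 2, 1, 1, 2], 0)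

def Spec_parse_subtree_value (flat_tree : List Int) (pointer : Int) (out : Int × Int) : Prop := out = parse_subtree_value_alt flat_tree pointer
instance (flat_tree : List Int) (pointer : Int) (out : Int × Int) : Decidable (Spec_parse_subtree_value flat_tree pointer out) := by unfold Spec_parse_subtree_value; infer_instance

-- ===== CLAIM (what is proved, stated in full; the proofs are below) =====
def Claim_equal_parse_subtree_value : Prop := ∀ (flat_tree : List Int) (pointer : Int), Dom_parse_subtree_value flat_tree pointer → Pre_parse_subtree_value flat_tree pointer → Spec_parse_subtree_value flat_tree pointer (parse_subtree_value flat_tree pointer)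

-- ===== LEMMAS AND PROOFS =====

-- max-fold facts used to bound the machine fuel
theorem init_le_foldl_max : ∀ (l : List Int) (a : Nat), a ≤ l.foldl (fun a x => max a x.toNat) a := by
  intro l
  induction l with
  | nil => intro a; exact le_refl a
  | cons h t ih =>
    intro a
    exact le_trans (Nat.le_max_left a h.toNat) (ih (max a h.toNat))

theorem mem_le_foldl_max : ∀ (l : List Int) (a : Nat) (x : Int), x ∈ l → x.toNat ≤ l.foldl (fun a x => max a x.toNat) a := by
  intro l
  induction l with
  | nil => intro a x hx; cases hx
  | cons h t ih =>
    intro a x hx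
    rcases List.mem_cons.mp hx with hx | hx
    · subst hx
      exact le_trans (Nat.le_max_right a x.toNat) (init_le_foldl_max t (max a x.toNat))
    · exact ih (max a h.toNat) x hx

theorem mem_le_maxEntry {x : Int} {ft : List Int} (h : x ∈ ft) : x.toNat ≤ maxEntry ft :=
  mem_le_foldl_max ft 0 x h

-- the metadata fold never raises when every index-like entry stays in range
theorem metaValue_isSome_aux (nc : Int) (children : List Int) :
    ∀ (md : List Int) (a : Int),
      (nc = 0 ∨ ∀ x ∈ md, -(children.length : Int) < x) →
      ∃ v, md.foldl (metaStep nc children) (some a) = some v := by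
  intro md
  induction md with
  | nil => intro a _; exact ⟨a, rfl⟩
  | cons x xs ih =>
    intro a hc
    rcases hc with hc | hc
    · have hstep : metaStep nc children (some a) x = some (a + x) := by
        simp [metaStep, hc]
      rw [List.foldl_cons, hstep]
      exact ih (a + x) (Or.inl hc)
    · have hx := hc x (List.mem_cons_self)
      have hrest : ∀ y ∈ xs, -(children.length : Int) < y := fun y hy => hc y (List.mem_cons_of_mem _ hy)
      by_cases h0 : nc = 0
      · have hstep : metaStep nc children (some a) x = some (a + x) := by
          simp [metaStep, h0]
        rw [List.foldl_cons, hstep]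
        exact ih (a + x) (Or.inl h0)
      · by_cases hle : x ≤ (children.length : Int)
        · have hin : ∃ c, PySem.List.pyGet? children (x - 1) = some c := by
            cases hg : PySem.List.pyGet? children (x - 1) with
            | some c => exact ⟨c, rfl⟩
            | none =>
              rw [PySem.List.pyGet?_eq_none_iff] at hg
              simp [PySem.Raise.InRange] at hg
              omega
          obtain ⟨c, hcv⟩ := hin
          have hstep : metaStep nc children (some a) x = some (a + c) := by
            simp [metaStep, h0, hle, hcv]
          rw [List.foldl_cons, hstep]
          exact ih (a + c) (Or.inr hrest)
        · have hstep : metaStep nc children (some a) x = some a := by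
            simp [metaStep, h0, hle]
          rw [List.foldl_cons, hstep]
          exact ih a (Or.inr hrest)

theorem metaValue_isSome (nc : Int) (children md : List Int)
    (hcond : nc = 0 ∨ ∀ x ∈ md, -(children.length : Int) < x) :
    ∃ v, metaValue nc children md = some v :=
  metaValue_isSome_aux nc children md 0 hcond

-- the wf child check certifies A's child loop, given that wfNode certifies one node at fuel f
theorem wfKids_childLoop (ft : List Int) (f : Nat)
    (hA : ∀ p e, wfNode ft f p = some e → ∃ v, parseAux ft f p = some (v, e)) :
    ∀ (rem : Nat) (p e : Int) (acc : List Int),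
      wfKidsGo (fun q => wfNode ft f q) rem p = some e →
      ∃ chs, childLoopGo (fun q => parseAux ft f q) rem p acc = some (chs, e) ∧
        chs.length = acc.length + rem := by
  intro rem
  induction rem with
  | zero =>
    intro p e acc h
    simp only [wfKidsGo] at h
    exact ⟨acc, by simp [childLoopGo, ← Option.some_inj.mp h], by omega⟩
  | succ rem ih =>
    intro p e acc h
    simp only [wfKidsGo] at h
    cases hn : wfNode ft f p with
    | none => simp only [hn] at h; cases h
    | some p' =>
      simp only [hn] at h
      obtain ⟨v, hv⟩ := hA p p' hn
      obtain ⟨chs, hc, hl⟩ := ih p' e (acc ++ [v]) h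
      refine ⟨chs, ?_, by simp at hl; omega⟩
      simp only [childLoopGo, hv]
      exact hc

theorem wf_parseAux (ft : List Int) :
    ∀ (f : Nat) (p e : Int), wfNode ft f p = some e → ∃ v, parseAux ft f p = some (v, e) := by
  intro f
  induction f with
  | zero => intro p e h; simp [wfNode] at h
  | succ f ih =>
    intro p e h
    simp only [wfNode] at h
    split at h
    case h_2 => cases h
    case h_1 nc nm h1 h2 =>
      split at h
      case h_1 => cases h
      case h_2 p2 hk =>
        split_ifs at h with hcond
        · obtain ⟨chs, hc, hl⟩ := wfKids_childLoop ft f ih nc.toNat (p + 2) p2 [] hk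
          simp only [List.length_nil, Nat.zero_add] at hl
          have hmv : ∃ v, metaValue nc chs (PySem.List.slice ft (some p2) (some (p2 + nm))) = some v := by
            apply metaValue_isSome
            rcases hcond with h0 | hlt
            · exact Or.inl h0
            · refine Or.inr (fun x hx => ?_)
              have := hlt x hx
              omega
          obtain ⟨v, hv⟩ := hmv
          refine ⟨v, ?_⟩
          simp only [parseAux, h1, h2, hc, hv]
          simp only [Option.some_inj] at h
          rw [h]

-- the state of Source B after a whole subtree (value v, end pointer e) has been parsed:
-- either it was the root (return), or its value is appended to the parent frame
def afterSub (ft : List Int) (v e : Int) (g : Nat) : List (Int × Int × List Int) → Option (Int × Int)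
  | [] => some (v, e)
  | (nc, nm, ch) :: st => closeGo ft (fun q stk => runB ft g q stk) e (nc, nm, ch ++ [v]) st

-- if the top frame is complete and its value computes, the closing loop reaches exactly afterSub
theorem closeB_complete (ft : List Int) (g : Nat) (p : Int) (nc nm v : Int) (ch : List Int)
    (st : List (Int × Int × List Int))
    (hle : nc ≤ (ch.length : Int))
    (hmv : metaValue nc ch (PySem.List.slice ft (some p) (some (p + nm))) = some v) :
    closeGo ft (fun q stk => runB ft g q stk) p (nc, nm, ch) st = afterSub ft v (p + nm) g st := by
  cases st with
  | nil =>
    rw [closeGo, if_pos hle, hmv]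
    rfl
  | cons fr st' =>
    obtain ⟨nc', nm', ch'⟩ := fr
    rw [closeGo, if_pos hle, hmv, afterSub]

-- simulation of A's child loop by the machine's close/descend alternation:
-- k counts the headers (frames) the machine still pushes for the remaining children
theorem simLoop (ft : List Int) (f : Nat)
    (hA : ∀ (p v e : Int), parseAux ft f p = some (v, e) →
      ∃ k, k ≤ (maxEntry ft + 1) ^ f ∧ ∀ (g : Nat) (st : List (Int × Int × List Int)),
        runB ft (g + k) p st = afterSub ft v e g st) :
    ∀ (rem : Nat) (p : Int) (acc chs : List Int) (p2 nc nm v : Int),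
      childLoopGo (fun q => parseAux ft f q) rem p acc = some (chs, p2) →
      ((rem = 0 ∧ nc ≤ (acc.length : Int)) ∨ ((acc.length : Int) + rem = nc)) →
      metaValue nc chs (PySem.List.slice ft (some p2) (some (p2 + nm))) = some v →
      ∃ k, k ≤ rem * (maxEntry ft + 1) ^ f ∧ ∀ (g : Nat) (st : List (Int × Int × List Int)),
        closeGo ft (fun q stk => runB ft (g + k) q stk) p (nc, nm, acc) st = afterSub ft v (p2 + nm) g st := by
  intro rem
  induction rem with
  | zero =>
    intro p acc chs p2 nc nm v hc hinv hmv
    simp only [childLoopGo, Option.some_inj, Prod.mk.injEq] at hc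
    obtain ⟨rfl, rfl⟩ := hc
    have hle : nc ≤ (acc.length : Int) := by
      rcases hinv with ⟨_, h⟩ | h
      · exact h
      · omega
    exact ⟨0, Nat.zero_le _, fun g st => by
      exact closeB_complete ft (g + 0) p nc nm v acc st hle hmv⟩
  | succ rem ih =>
    intro p acc chs p2 nc nm v hc hinv hmv
    simp only [childLoopGo] at hc
    cases hp : parseAux ft f p with
    | none => simp only [hp] at hc; cases hc
    | some r =>
      obtain ⟨v1, p1⟩ := r
      simp only [hp] at hc
      have hnc : (acc.length : Int) + (rem + 1) = nc := by
        rcases hinv with ⟨h, _⟩ | h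
        · cases h
        · exact_mod_cast h
      obtain ⟨k1, hk1, hrun1⟩ := hA p v1 p1 hp
      obtain ⟨k2, hk2, hrun2⟩ := ih p1 (acc ++ [v1]) chs p2 nc nm v hc
        (Or.inr (by simp; omega)) hmv
      refine ⟨k1 + k2, ?_, ?_⟩
      · calc k1 + k2 ≤ (maxEntry ft + 1) ^ f + rem * (maxEntry ft + 1) ^ f := Nat.add_le_add hk1 hk2
          _ = (rem + 1) * (maxEntry ft + 1) ^ f := by ring
      · intro g st
        have hgt : ¬ nc ≤ (acc.length : Int) := by omega
        have h1 : closeGo ft (fun q stk => runB ft (g + (k1 + k2)) q stk) p (nc, nm, acc) st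
            = runB ft (g + (k1 + k2)) p ((nc, nm, acc) :: st) := by
          rw [closeGo, if_neg hgt]
        have h2 : runB ft ((g + k2) + k1) p ((nc, nm, acc) :: st)
            = afterSub ft v1 p1 (g + k2) ((nc, nm, acc) :: st) := hrun1 (g + k2) _
        rw [h1, show g + (k1 + k2) = (g + k2) + k1 by omega, h2]
        simp only [afterSub]
        exact hrun2 g st

-- main simulation: a subtree A parses is one push plus its children's pushes for the machine
theorem simA (ft : List Int) :
    ∀ (f : Nat) (p v e : Int), parseAux ft f p = some (v, e) →
      ∃ k, k ≤ (maxEntry ft + 1) ^ f ∧ ∀ (g : Nat) (st : List (Int × Int × List Int)),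
        runB ft (g + k) p st = afterSub ft v e g st := by
  intro f
  induction f with
  | zero => intro p v e h; simp [parseAux] at h
  | succ f ih =>
    intro p v e h
    simp only [parseAux] at h
    split at h
    case h_2 => cases h
    case h_1 nc nm h1 h2 =>
      split at h
      case h_1 => cases h
      case h_2 chs p2 hcl =>
        split at h
        case h_1 => cases h
        case h_2 v' hmv =>
          simp only [Option.some_inj, Prod.mk.injEq] at h
          obtain ⟨rfl, rfl⟩ := h
          have hinv' : ((nc.toNat = 0 ∧ nc ≤ ((List.length ([] : List Int)) : Int)) ∨ (((List.length ([] : List Int)) : Int) + nc.toNat = nc)) := by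
            by_cases hn : nc ≤ 0
            · exact Or.inl ⟨by omega, by simpa using hn⟩
            · exact Or.inr (by simp; omega)
          obtain ⟨k2, hk2, hrun2⟩ := simLoop ft f ih nc.toNat (p + 2) [] chs p2 nc nm v' hcl hinv' hmv
          have hC : nc.toNat ≤ maxEntry ft :=
            mem_le_maxEntry (PySem.List.mem_of_pyGet?_eq_some ft h1)
          refine ⟨k2 + 1, ?_, ?_⟩
          · have h1p : 1 ≤ (maxEntry ft + 1) ^ f := Nat.one_le_pow _ _ (by omega)
            have hb : k2 + 1 ≤ nc.toNat * (maxEntry ft + 1) ^ f + 1 := by omega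
            calc k2 + 1 ≤ nc.toNat * (maxEntry ft + 1) ^ f + 1 := hb
              _ ≤ maxEntry ft * (maxEntry ft + 1) ^ f + (maxEntry ft + 1) ^ f := by
                  have := Nat.mul_le_mul_right ((maxEntry ft + 1) ^ f) hC
                  omega
              _ = (maxEntry ft + 1) ^ (f + 1) := by ring
          · intro g st
            have hstep : runB ft ((g + k2) + 1) p st
                = closeGo ft (fun q stk => runB ft (g + k2) q stk) (p + 2) (nc, nm, []) st := by
              simp only [runB, h1, h2]
            rw [show g + (k2 + 1) = (g + k2) + 1 by omega, hstep]
            exact hrun2 g st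

-- ===== VERDICT (by name: the statement is the Claim_ definition above) =====
theorem parse_subtree_value_spec : Claim_equal_parse_subtree_value := by
  intro ft p _hdom hpre
  unfold Spec_parse_subtree_value
  unfold Pre_parse_subtree_value at hpre
  obtain ⟨e, he⟩ := Option.isSome_iff_exists.mp hpre
  obtain ⟨v, hv⟩ := wf_parseAux ft _ p e he
  obtain ⟨k, hk, hrun⟩ := simA ft _ p v e hv
  have hkB : k ≤ bFuel ft := le_trans hk (by
    unfold bFuel
    exact Nat.pow_le_pow_left (by omega) _)
  have hr : runB ft (bFuel ft) p [] = some (v, e) := by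
    have := hrun (bFuel ft - k) []
    rwa [Nat.sub_add_cancel hkB] at this
  unfold parse_subtree_value parse_subtree_value_alt
  rw [hv, hr]
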